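-- pv_equiv track=rewrite | github.com/hozzang-98/Study | 프로그래머스/1/258712. 가장 많이 받은 선물/가장 많이 받은 선물.py | solution
-- ===== SOURCE A (Python) =====
-- def solution(friends, gifts):
--
--     answer = 0
--     n = len(friends)
--     dic = {friend:[0,0] for friend in friends} # give, take
--     gift_idx = [0]*n
--     friends_idx = {friend:idx for idx, friend in enumerate(friends)}
--
--     table = [[0] * n for _ in range(n)]
--
--     for gift in gifts:
--
--         give, take = gift.split()
--         giver_idx, taker_idx = friends_idx[give], friends_idx[take]
--         gift_idx[giver_idx] += 1
--         gift_idx[taker_idx] -= 1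
--         table[giver_idx][taker_idx] += 1
--
--     result = [0] * n
--     for i in range(n):
--
--         for j in range(n):
--
--             if i == j: continue
--
--             diff = table[i][j] - table[j][i]
--             if diff > 0:
--                 result[i] += 1
--
--             elif diff == 0:
--
--                 if gift_idx[i] > gift_idx[j]:
--
--                     result[i] += 1
--
--     return max(result)
-- ===== SOURCE B (Python) =====
-- def solution(friends, gifts):
--     n = len(friends)
--     idx = {f: k for k, f in enumerate(friends)}
--     net = [0] * n
--     cnt = {}
--     for g in gifts:
--         a, b = g.split()
--         i, j = idx[a], idx[b]
--         net[i] += 1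
--         net[j] -= 1
--         cnt[(i, j)] = cnt.get((i, j), 0) + 1
--     # rank by sorting: below[v] = how many people have net strictly below v
--     below = {}
--     run = 0
--     for v in sorted(net):
--         if v not in below:
--             below[v] = run
--         run += 1
--     score = [below[v] for v in net]
--     # sparse correction: only pairs that actually exchanged gifts can deviate
--     # from the pure-net ranking; each decided pair is seen once, from its
--     # winning direction (the side with the strictly larger count).
--     for (i, j), c in cnt.items():
--         if c > cnt.get((j, i), 0):
--             if net[i] > net[j]:
--                 score[i] -= 1
--             elif net[j] > net[i]:
--                 score[j] -= 1
--             score[i] += 1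
--     return max(score)
-- ===== Notes on version B (the rewrite author's own statement) =====
-- stated objective: alternative
-- what changed: B abandons A's full O(n^2) all-pairs comparison: it ranks everyone at once by sorting the net gift counts (score[i] starts as the number of people with strictly smaller net, read off a first-occurrence-position dict over sorted(net)) and then applies a sparse correction only to pairs that actually exchanged gifts, each decided pair visited once from its winning direction in cnt.items(); Pre_ excludes inputs where A raises: empty friends (ValueError from max) and gifts that do not split into exactly two known names (ValueError/KeyError).
import Mathlib
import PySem

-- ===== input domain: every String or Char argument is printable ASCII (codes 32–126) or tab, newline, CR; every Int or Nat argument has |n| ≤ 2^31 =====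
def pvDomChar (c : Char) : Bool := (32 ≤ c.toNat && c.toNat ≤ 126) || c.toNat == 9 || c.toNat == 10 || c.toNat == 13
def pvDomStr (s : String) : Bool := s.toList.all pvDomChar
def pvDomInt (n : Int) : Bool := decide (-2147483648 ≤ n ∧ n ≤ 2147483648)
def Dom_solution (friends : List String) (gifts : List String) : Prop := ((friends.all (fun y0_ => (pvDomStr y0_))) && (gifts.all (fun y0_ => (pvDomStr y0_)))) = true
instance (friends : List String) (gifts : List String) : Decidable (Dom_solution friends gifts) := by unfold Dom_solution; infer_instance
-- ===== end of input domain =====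

-- B replaces A's all-pairs double loop by a rank-by-sorting of the net gift counts plus a sparse
-- correction pass over the pairs that actually exchanged gifts; same return value on Pre_ (alternative algorithm).

-- ===== PORT A =====
-- per-gift loop body of A
def aStep (fidx : PySem.Dict String Int) (st : List Int × List (List Int)) (gift : String) :
    List Int × List (List Int) :=
  let parts := PySem.Str.split₀ gift
  let give := parts.getD 0 ""
  let takeS := parts.getD 1 ""
  let gi := fidx.getD give 0
  let ti := fidx.getD takeS 0
  let gidx := PySem.List.pySetD st.1 gi (PySem.List.pyGetD st.1 gi 0 + 1)
  let gidx := PySem.List.pySetD gidx ti (PySem.List.pyGetD gidx ti 0 - 1)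
  let row := PySem.List.pyGetD st.2 gi []
  let tbl := PySem.List.pySetD st.2 gi (PySem.List.pySetD row ti (PySem.List.pyGetD row ti 0 + 1))
  (gidx, tbl)

-- inner j-loop body of A's scoring double loop
def aInner (tbl : List (List Int)) (gidx : List Int) (i : Int) (res : List Int) (j : Int) : List Int :=
  if i == j then res
  else
    let diff := PySem.List.pyGetD (PySem.List.pyGetD tbl i []) j 0 -
                PySem.List.pyGetD (PySem.List.pyGetD tbl j []) i 0
    if diff > 0 then PySem.List.pySetD res i (PySem.List.pyGetD res i 0 + 1)
    else if diff = 0 then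
      if PySem.List.pyGetD gidx i 0 > PySem.List.pyGetD gidx j 0 then
        PySem.List.pySetD res i (PySem.List.pyGetD res i 0 + 1)
      else res
    else res

def solution (friends : List String) (gifts : List String) : Int :=
  let _answer : Int := 0
  let n : Int := friends.length
  let _dic : PySem.Dict String (List Int) :=
    friends.foldl (fun d f => d.insert f [0, 0]) PySem.Dict.empty
  let gift_idx : List Int := PySem.List.pyRepeat [0] n
  let fidx : PySem.Dict String Int :=
    (PySem.List.enumerate friends 0).foldl (fun d p => d.insert p.2 p.1) PySem.Dict.empty
  let table : List (List Int) := (PySem.List.pyRange 0 n 1).map (fun _ => PySem.List.pyRepeat [0] n)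
  let st := gifts.foldl (aStep fidx) (gift_idx, table)
  let result := (PySem.List.pyRange 0 n 1).foldl
      (fun res i => (PySem.List.pyRange 0 n 1).foldl (aInner st.2 st.1 i) res)
      (PySem.List.pyRepeat [0] n)
  (PySem.List.max? result (fun x => x)).getD 0

-- ===== PORT B =====
-- per-gift loop body of B: net list and sparse (giver, taker) pair counter
def bStep (fidx : PySem.Dict String Int)
    (st : List Int × PySem.Dict (Int × Int) Int) (gift : String) :
    List Int × PySem.Dict (Int × Int) Int :=
  let parts := PySem.Str.split₀ gift
  let a := parts.getD 0 ""
  let b := parts.getD 1 ""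
  let i := fidx.getD a 0
  let j := fidx.getD b 0
  let net := PySem.List.pySetD st.1 i (PySem.List.pyGetD st.1 i 0 + 1)
  let net := PySem.List.pySetD net j (PySem.List.pyGetD net j 0 - 1)
  let cnt := st.2.insert (i, j) (st.2.getD (i, j) 0 + 1)
  (net, cnt)

-- body of B's pass over sorted(net): record the first position of each distinct value
def bBelow (st : PySem.Dict Int Int × Int) (v : Int) : PySem.Dict Int Int × Int :=
  let below := if st.1.contains v then st.1 else st.1.insert v st.2
  (below, st.2 + 1)

-- body of B's sparse correction loop over cnt.items()
def bFix (cnt : PySem.Dict (Int × Int) Int) (net : List Int)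
    (score : List Int) (item : (Int × Int) × Int) : List Int :=
  let i := item.1.1
  let j := item.1.2
  let c := item.2
  if c > cnt.getD (j, i) 0 then
    let score :=
      if PySem.List.pyGetD net i 0 > PySem.List.pyGetD net j 0 then
        PySem.List.pySetD score i (PySem.List.pyGetD score i 0 - 1)
      else if PySem.List.pyGetD net j 0 > PySem.List.pyGetD net i 0 then
        PySem.List.pySetD score j (PySem.List.pyGetD score j 0 - 1)
      else score
    PySem.List.pySetD score i (PySem.List.pyGetD score i 0 + 1)
  else score

def solution_alt (friends : List String) (gifts : List String) : Int :=
  let n : Int := friends.length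
  let fidx : PySem.Dict String Int :=
    (PySem.List.enumerate friends 0).foldl (fun d p => d.insert p.2 p.1) PySem.Dict.empty
  let st := gifts.foldl (bStep fidx) (PySem.List.pyRepeat [0] n, PySem.Dict.empty)
  let net := st.1
  let cnt := st.2
  let below := ((PySem.List.sorted net (fun x => x) false).foldl bBelow (PySem.Dict.empty, 0)).1
  let score0 := net.map (fun v => below.getD v 0)
  let score := cnt.items.foldl (bFix cnt net) score0
  (PySem.List.max? score (fun x => x)).getD 0

-- ===== PRECONDITION & SPEC =====
-- Pre_ excludes exactly the inputs where A raises: empty friends (ValueError from max([])) and any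
-- gift that does not split into exactly two tokens (ValueError) or names someone not in friends (KeyError).
def Pre_solution (friends : List String) (gifts : List String) : Prop :=
  friends ≠ [] ∧ ∀ g ∈ gifts, (PySem.Str.split₀ g).length = 2 ∧
    (PySem.Str.split₀ g).getD 0 "" ∈ friends ∧ (PySem.Str.split₀ g).getD 1 "" ∈ friends
instance (friends : List String) (gifts : List String) : Decidable (Pre_solution friends gifts) := by
  unfold Pre_solution; infer_instance

def pvWitness_solution : List String × List String := (["a", "b"], ["a b", "b a", "a b"])

def Spec_solution (friends : List String) (gifts : List String) (out : Int) : Prop :=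
  out = solution_alt friends gifts
instance (friends : List String) (gifts : List String) (out : Int) :
    Decidable (Spec_solution friends gifts out) := by unfold Spec_solution; infer_instance

-- ===== CLAIM (what is proved, stated in full; the proofs are below) =====
def Claim_equal_solution : Prop := ∀ (friends : List String) (gifts : List String),
  Dom_solution friends gifts → Pre_solution friends gifts →
  Spec_solution friends gifts (solution friends gifts)

-- ===== LEMMAS AND PROOFS =====

-- table / net read as functions of indices
def tOf (tbl : List (List Int)) (i j : Int) : Int :=
  PySem.List.pyGetD (PySem.List.pyGetD tbl i []) j 0
def gOf (gidx : List Int) (i : Int) : Int := PySem.List.pyGetD gidx i 0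

-- "i beats j" decision A makes
def beatsB (t : Int → Int → Int) (g : Int → Int) (i j : Int) : Bool :=
  decide (t i j - t j i > 0) || (decide (t i j - t j i = 0) && decide (g i > g j))

def score (t : Int → Int → Int) (g : Int → Int) (nn : Nat) (k : Int) : Int :=
  ((PySem.List.pyRange 0 nn 1).countP (fun m => m != k && beatsB t g k m) : Int)

-- pair of indices inside [0, nn)
def InR (nn : Nat) (p : Int × Int) : Prop :=
  0 ≤ p.1 ∧ p.1 < nn ∧ 0 ≤ p.2 ∧ p.2 < nn

-- invariant tying A's (gift_idx, table) to B's (net, cnt) through the gift loop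
def GInv (nn : Nat) (gidx : List Int) (tbl : List (List Int))
    (net : List Int) (cnt : PySem.Dict (Int × Int) Int) : Prop :=
  gidx.length = nn ∧ tbl.length = nn ∧ (∀ r ∈ tbl, r.length = nn) ∧
  net = gidx ∧
  (∀ i j : Int, 0 ≤ i → i < nn → 0 ≤ j → j < nn → cnt.getD (i, j) 0 = tOf tbl i j) ∧
  cnt.keys.Nodup ∧
  (∀ p, cnt.contains p = true → InR nn p ∧ 1 ≤ cnt.getD p 0) ∧
  (∀ p, cnt.contains p = false → cnt.getD p 0 = 0)

theorem pyGetD_pySetD_int {α : Type} (xs : List α) (a b : Int) (v d : α) (ha0 : 0 ≤ a)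
    (hb0 : 0 ≤ b) (hb : b < xs.length) :
    PySem.List.pyGetD (PySem.List.pySetD xs a v) b d = if b = a then v else PySem.List.pyGetD xs b d := by
  rw [PySem.List.pySetD_of_nonneg _ _ ha0]
  rw [PySem.List.pyGetD_eq_getElem _ _ hb0 (by simpa using hb),
      PySem.List.pyGetD_eq_getElem _ _ hb0 hb]
  rw [List.getElem_set]
  split_ifs with h1 h2 h2 <;> first | rfl | omega

theorem length_pySetD_nonneg {α : Type} (xs : List α) (a : Int) (v : α) (ha0 : 0 ≤ a) :
    (PySem.List.pySetD xs a v).length = xs.length := by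
  rw [PySem.List.pySetD_of_nonneg _ _ ha0, List.length_set]

theorem pySetD_pySetD_same {α : Type} (xs : List α) (a : Int) (v w : α) (ha0 : 0 ≤ a) :
    PySem.List.pySetD (PySem.List.pySetD xs a v) a w = PySem.List.pySetD xs a w := by
  rw [PySem.List.pySetD_of_nonneg _ _ ha0, PySem.List.pySetD_of_nonneg _ _ ha0,
      PySem.List.pySetD_of_nonneg _ _ ha0, List.set_set]

theorem set_self_int (xs : List Int) (a : Int) (ha0 : 0 ≤ a) (ha : a < xs.length) :
    PySem.List.pySetD xs a (PySem.List.pyGetD xs a 0) = xs := by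
  rw [PySem.List.pySetD_of_nonneg _ _ ha0, PySem.List.pyGetD_eq_getElem _ _ ha0 ha]
  exact List.set_getElem_self (by omega)

theorem fidx_getD_skip (l : List (Int × String)) (d : PySem.Dict String Int) (f : String) (v0 : Int)
    (hf : f ∉ l.map (·.2)) :
    ((l.foldl (fun d p => d.insert p.2 p.1) d).getD f v0) = d.getD f v0 := by
  induction l generalizing d with
  | nil => rfl
  | cons p t ih =>
      simp only [List.map_cons, List.mem_cons, not_or] at hf
      simp only [List.foldl_cons]
      rw [ih _ hf.2, PySem.Dict.getD_insert]
      simp [hf.1]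

theorem fidx_getD_bounds (fs : List String) (f : String) (hf : f ∈ fs) (s : Int)
    (d : PySem.Dict String Int) (v0 : Int) :
    s ≤ ((PySem.List.enumerate fs s).foldl (fun d p => d.insert p.2 p.1) d).getD f v0 ∧
    ((PySem.List.enumerate fs s).foldl (fun d p => d.insert p.2 p.1) d).getD f v0 < s + fs.length := by
  induction fs generalizing s d with
  | nil => simp at hf
  | cons x t ih =>
      rw [PySem.List.enumerate_cons]
      simp only [List.foldl_cons]
      by_cases hft : f ∈ t
      · have := ih hft (s + 1) (d.insert x s)
        constructor
        · linarith [this.1]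
        · have h2 := this.2
          simp only [List.length_cons]
          push_cast at h2 ⊢
          linarith
      · have hx : f = x := by by_cases hfx : f = x; exact hfx; simp [hfx, hft] at hf
        rw [fidx_getD_skip _ _ _ _ (by simpa [PySem.List.map_snd_enumerate] using hft)]
        subst hx
        rw [PySem.Dict.getD_insert_self]
        simp only [List.length_cons]
        constructor
        · linarith
        · push_cast; linarith [Int.natCast_nonneg t.length]

theorem gstep_pres (nn : Nat) (fidx : PySem.Dict String Int) (gift : String)
    (gidx : List Int) (tbl : List (List Int)) (net : List Int)
    (cnt : PySem.Dict (Int × Int) Int)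
    (hgi : 0 ≤ fidx.getD ((PySem.Str.split₀ gift).getD 0 "") 0 ∧
           fidx.getD ((PySem.Str.split₀ gift).getD 0 "") 0 < nn)
    (hti : 0 ≤ fidx.getD ((PySem.Str.split₀ gift).getD 1 "") 0 ∧
           fidx.getD ((PySem.Str.split₀ gift).getD 1 "") 0 < nn)
    (h : GInv nn gidx tbl net cnt) :
    GInv nn (aStep fidx (gidx, tbl) gift).1 (aStep fidx (gidx, tbl) gift).2
      (bStep fidx (net, cnt) gift).1 (bStep fidx (net, cnt) gift).2 := by
  obtain ⟨h1, h2, h3, hnet, h5, h6, h7, h8⟩ := h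
  obtain ⟨hgi0, hgi1⟩ := hgi
  obtain ⟨hti0, hti1⟩ := hti
  revert hgi0 hgi1 hti0 hti1
  set gi := fidx.getD ((PySem.Str.split₀ gift).getD 0 "") 0 with hgi_def
  set ti := fidx.getD ((PySem.Str.split₀ gift).getD 1 "") 0 with hti_def
  intro hgi0 hgi1 hti0 hti1
  subst hnet
  have ha : aStep fidx (net, tbl) gift =
      (PySem.List.pySetD (PySem.List.pySetD net gi (PySem.List.pyGetD net gi 0 + 1)) ti
        (PySem.List.pyGetD (PySem.List.pySetD net gi (PySem.List.pyGetD net gi 0 + 1)) ti 0 - 1),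
       PySem.List.pySetD tbl gi
        (PySem.List.pySetD (PySem.List.pyGetD tbl gi []) ti
          (PySem.List.pyGetD (PySem.List.pyGetD tbl gi []) ti 0 + 1))) := rfl
  have hbq : bStep fidx (net, cnt) gift =
      (PySem.List.pySetD (PySem.List.pySetD net gi (PySem.List.pyGetD net gi 0 + 1)) ti
        (PySem.List.pyGetD (PySem.List.pySetD net gi (PySem.List.pyGetD net gi 0 + 1)) ti 0 - 1),
       cnt.insert (gi, ti) (cnt.getD (gi, ti) 0 + 1)) := rfl
  rw [ha, hbq]
  set row := PySem.List.pyGetD tbl gi [] with hrow_def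
  set newrow := PySem.List.pySetD row ti (PySem.List.pyGetD row ti 0 + 1) with hnewrow_def
  set net1 := PySem.List.pySetD net gi (PySem.List.pyGetD net gi 0 + 1) with hnet1
  have hlen1 : net1.length = nn := by rw [hnet1, length_pySetD_nonneg _ _ _ hgi0, h1]
  have hrow : row.length = nn := by
    apply h3
    apply PySem.List.pyGetD_mem
    simp [PySem.Raise.InRange, h2]; omega
  have hget0 : 0 ≤ cnt.getD (gi, ti) 0 := by
    by_cases hc : cnt.contains (gi, ti) = true
    · linarith [(h7 _ hc).2]
    · rw [h8 _ (by simpa using hc)]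
  refine ⟨?_, ?_, ?_, rfl, ?_, ?_, ?_, ?_⟩
  · rw [length_pySetD_nonneg _ _ _ hti0, hlen1]
  · rw [length_pySetD_nonneg _ _ _ hgi0, h2]
  · intro r hr
    rw [PySem.List.pySetD_of_nonneg _ _ hgi0] at hr
    rcases List.mem_or_eq_of_mem_set hr with hr' | hr'
    · exact h3 r hr'
    · rw [hr', hnewrow_def, length_pySetD_nonneg _ _ _ hti0, hrow]
  · intro k l hk0 hk1 hl0 hl1
    have hrhs : tOf (PySem.List.pySetD tbl gi newrow) k l =
        if k = gi then PySem.List.pyGetD newrow l 0 else tOf tbl k l := by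
      unfold tOf
      rw [pyGetD_pySetD_int _ _ _ _ _ hgi0 hk0 (by omega)]
      split_ifs <;> rfl
    have hnewrow : PySem.List.pyGetD newrow l 0 =
        if l = ti then PySem.List.pyGetD row ti 0 + 1 else PySem.List.pyGetD row l 0 := by
      rw [hnewrow_def, pyGetD_pySetD_int _ _ _ _ _ hti0 hl0 (by omega)]
    rw [PySem.Dict.getD_insert, hrhs]
    by_cases hkg : k = gi
    · rw [if_pos hkg, hnewrow]
      by_cases hlt : l = ti
      · rw [if_pos hlt, if_pos (by rw [hkg, hlt]), h5 gi ti hgi0 hgi1 hti0 hti1]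
        rfl
      · rw [if_neg hlt, if_neg (by simp [Prod.mk.injEq, hlt]), h5 k l hk0 hk1 hl0 hl1]
        unfold tOf; rw [hkg]
    · rw [if_neg hkg, if_neg (by simp [Prod.mk.injEq]; intro h; exact absurd h hkg)]
      exact h5 k l hk0 hk1 hl0 hl1
  · exact PySem.Dict.nodup_keys_insert _ _ _ h6
  · intro p hp
    rw [PySem.Dict.contains_insert] at hp
    rw [PySem.Dict.getD_insert]
    rcases Bool.or_eq_true _ _ |>.mp hp with hp' | hp'
    · have hpe : p = (gi, ti) := by simpa using hp'
      subst hpe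
      rw [if_pos rfl]
      exact ⟨⟨hgi0, hgi1, hti0, hti1⟩, by omega⟩
    · obtain ⟨hin, hv⟩ := h7 p hp'
      by_cases hpe : p = (gi, ti)
      · subst hpe
        rw [if_pos rfl]
        exact ⟨⟨hgi0, hgi1, hti0, hti1⟩, by omega⟩
      · rw [if_neg hpe]
        exact ⟨hin, hv⟩
  · intro p hp
    rw [PySem.Dict.contains_insert] at hp
    rcases Bool.or_eq_false_iff.mp hp with ⟨hp1, hp2⟩
    rw [PySem.Dict.getD_insert, if_neg (by simpa using hp1)]
    exact h8 p hp2

theorem gfold_pres (nn : Nat) (fidx : PySem.Dict String Int) (gifts : List String)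
    (hb : ∀ g ∈ gifts, (0 ≤ fidx.getD ((PySem.Str.split₀ g).getD 0 "") 0 ∧
            fidx.getD ((PySem.Str.split₀ g).getD 0 "") 0 < nn) ∧
          (0 ≤ fidx.getD ((PySem.Str.split₀ g).getD 1 "") 0 ∧
            fidx.getD ((PySem.Str.split₀ g).getD 1 "") 0 < nn))
    (gidx : List Int) (tbl : List (List Int)) (net : List Int)
    (cnt : PySem.Dict (Int × Int) Int) (h : GInv nn gidx tbl net cnt) :
    GInv nn (gifts.foldl (aStep fidx) (gidx, tbl)).1 (gifts.foldl (aStep fidx) (gidx, tbl)).2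
      (gifts.foldl (bStep fidx) (net, cnt)).1 (gifts.foldl (bStep fidx) (net, cnt)).2 := by
  induction gifts generalizing gidx tbl net cnt with
  | nil => simpa using h
  | cons g t ih =>
      simp only [List.foldl_cons]
      have hg := hb g (List.mem_cons_self ..)
      have hstep := gstep_pres nn fidx g gidx tbl net cnt hg.1 hg.2 h
      have h2 := ih (fun g' hg' => hb g' (List.mem_cons_of_mem _ hg'))
        (aStep fidx (gidx, tbl) g).1 (aStep fidx (gidx, tbl) g).2
        (bStep fidx (net, cnt) g).1 (bStep fidx (net, cnt) g).2 hstep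
      simpa using h2

theorem aInner_fold (tbl : List (List Int)) (gidx : List Int) (i : Int) (nn : Nat) :
    ∀ (fuel : Nat) (a : Int) (res : List Int), (nn : Int) - a ≤ fuel → 0 ≤ i → i < res.length →
      (PySem.List.pyRange a nn 1).foldl (aInner tbl gidx i) res =
      PySem.List.pySetD res i (PySem.List.pyGetD res i 0 +
        ((PySem.List.pyRange a nn 1).countP
          (fun j => j != i && beatsB (tOf tbl) (gOf gidx) i j) : Int)) := by
  intro fuel
  induction fuel with
  | zero =>
      intro a res hfuel hi0 hi1
      rw [PySem.List.pyRange_one_eq_nil (by omega)]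
      simp only [List.foldl_nil, List.countP_nil, Int.natCast_zero, add_zero]
      rw [set_self_int _ _ hi0 hi1]
  | succ f ih =>
      intro a res hfuel hi0 hi1
      by_cases han : (nn : Int) ≤ a
      · rw [PySem.List.pyRange_one_eq_nil han]
        simp only [List.foldl_nil, List.countP_nil, Int.natCast_zero, add_zero]
        rw [set_self_int _ _ hi0 hi1]
      · rw [PySem.List.pyRange_one_cons (by omega)]
        rw [List.foldl_cons, List.countP_cons]
        set res' := aInner tbl gidx i res a with hres'
        have hbump : (res' = res ∧ (a != i && beatsB (tOf tbl) (gOf gidx) i a) = false) ∨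
            (res' = PySem.List.pySetD res i (PySem.List.pyGetD res i 0 + 1) ∧
             (a != i && beatsB (tOf tbl) (gOf gidx) i a) = true) := by
          by_cases hia : i = a
          · left
            refine ⟨by rw [hres']; simp [aInner, hia], by simp [hia]⟩
          · have hne : (i == a) = false := by simp [hia]
            rw [hres']
            simp only [aInner, hne, Bool.false_eq_true, if_false]
            split_ifs with c1 c2 c3
            · right; exact ⟨rfl, by simp [beatsB, tOf, gOf, Ne.symm hia]; omega⟩
            · right; exact ⟨rfl, by simp [beatsB, tOf, gOf, Ne.symm hia]; omega⟩
            · left;  exact ⟨rfl, by simp [beatsB, tOf, gOf, Ne.symm hia]; omega⟩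
            · left;  exact ⟨rfl, by simp [beatsB, tOf, gOf, Ne.symm hia]; omega⟩
        rcases hbump with ⟨he, hp⟩ | ⟨he, hp⟩
        · rw [ih (a + 1) res' (by omega) hi0 (by rw [he]; exact hi1), he, hp]
          norm_num
        · have hlen' : res'.length = res.length := by
            rw [he, length_pySetD_nonneg _ _ _ hi0]
          rw [ih (a + 1) res' (by omega) hi0 (by rw [hlen']; exact hi1), hp, he,
              pySetD_pySetD_same _ _ _ _ hi0,
              pyGetD_pySetD_int _ _ _ _ _ hi0 hi0 (by exact_mod_cast hi1)]
          rw [if_pos rfl, if_pos rfl]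
          congr 1
          push_cast
          ring

theorem aOuter_fold (tbl : List (List Int)) (gidx : List Int) (nn : Nat) :
    ∀ (fuel : Nat) (a : Int) (res : List Int), (nn : Int) - a ≤ fuel → 0 ≤ a →
      res.length = nn →
      (∀ k : Nat, k < nn → res.getD k 0 = if (k : Int) < a then score (tOf tbl) (gOf gidx) nn k else 0) →
      ((PySem.List.pyRange a nn 1).foldl
          (fun res i => (PySem.List.pyRange 0 nn 1).foldl (aInner tbl gidx i) res) res).length = nn ∧
      ∀ k : Nat, k < nn →
        ((PySem.List.pyRange a nn 1).foldl
          (fun res i => (PySem.List.pyRange 0 nn 1).foldl (aInner tbl gidx i) res) res).getD k 0 =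
        if (k : Int) < max a nn then score (tOf tbl) (gOf gidx) nn k else 0 := by
  intro fuel
  induction fuel with
  | zero =>
      intro a res hfuel ha0 hlen hres
      rw [show PySem.List.pyRange a (nn : Int) 1 = [] from PySem.List.pyRange_one_eq_nil (by omega)]
      refine ⟨hlen, ?_⟩
      intro k hk
      rw [List.foldl_nil, hres k hk]
      have h1 : ((k : Int) < a) = ((k : Int) < max a nn) := by
        simp only [eq_iff_iff]; omega
      simp only [h1]
  | succ f ih =>
      intro a res hfuel ha0 hlen hres
      by_cases han : (nn : Int) ≤ a
      · rw [show PySem.List.pyRange a (nn : Int) 1 = [] from PySem.List.pyRange_one_eq_nil han]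
        refine ⟨hlen, ?_⟩
        intro k hk
        rw [List.foldl_nil, hres k hk]
        have h1 : ((k : Int) < a) = ((k : Int) < max a nn) := by
          simp only [eq_iff_iff]; omega
        simp only [h1]
      · rw [show PySem.List.pyRange a (nn : Int) 1 = a :: PySem.List.pyRange (a + 1) (nn : Int) 1 from
            PySem.List.pyRange_one_cons (by omega), List.foldl_cons]
        set res' := (PySem.List.pyRange 0 nn 1).foldl (aInner tbl gidx a) res with hres'
        have hre : res' = PySem.List.pySetD res a (PySem.List.pyGetD res a 0 +
            score (tOf tbl) (gOf gidx) nn a) := by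
          rw [hres', aInner_fold tbl gidx a nn nn 0 res (by omega) ha0 (by omega)]
          rfl
        have hget_a : PySem.List.pyGetD res a 0 = 0 := by
          rw [PySem.List.pyGetD_eq_getElem _ _ ha0 (by omega)]
          have := hres a.toNat (by omega)
          rw [List.getD_eq_getElem _ _ (by omega)] at this
          rw [this, if_neg (show ¬ ((a.toNat : Int) < a) by omega)]
        have hlen' : res'.length = nn := by
          rw [hre, length_pySetD_nonneg _ _ _ ha0, hlen]
        have hres'' : ∀ k : Nat, k < nn → res'.getD k 0 =
            if (k : Int) < a + 1 then score (tOf tbl) (gOf gidx) nn k else 0 := by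
          intro k hk
          have : res'.getD k 0 = PySem.List.pyGetD res' (k : Int) 0 := by
            rw [PySem.List.pyGetD_natCast]
          rw [this, hre, pyGetD_pySetD_int _ _ _ _ _ ha0 (by omega) (by omega)]
          split_ifs with h1 h2 h2
          · rw [hget_a, zero_add, h1]
          · omega
          · rw [PySem.List.pyGetD_natCast, hres k hk, if_pos (by omega)]
          · rw [PySem.List.pyGetD_natCast, hres k hk, if_neg (by omega)]
        obtain ⟨hl, he⟩ := ih (a + 1) res' (by omega) (by omega) hlen' hres''
        refine ⟨hl, ?_⟩
        intro k hk
        rw [he k hk]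
        have h1 : ((k : Int) < max (a + 1) nn) = ((k : Int) < max a nn) := by
          simp only [eq_iff_iff]; omega
        simp only [h1]

-- ---- B-side: the `below` dict over sorted(net) reads off the strict rank ----

theorem bBelow_pres (l : List Int) (b : PySem.Dict Int Int) (r : Int) (v : Int)
    (hc : b.contains v = true) :
    (l.foldl bBelow (b, r)).1.contains v = true ∧
    (l.foldl bBelow (b, r)).1.getD v 0 = b.getD v 0 := by
  induction l generalizing b r with
  | nil => exact ⟨hc, rfl⟩
  | cons w t ih =>
      simp only [List.foldl_cons]
      by_cases hw : b.contains w = true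
      · have : bBelow (b, r) w = (b, r + 1) := by simp [bBelow, hw]
        rw [this]
        exact ih b (r + 1) hc
      · have hvw : v ≠ w := by intro h; rw [h] at hc; exact absurd hc (by simp [hw])
        have hw' : b.contains w = false := by simpa using hw
        have : bBelow (b, r) w = (b.insert w r, r + 1) := by
          simp [bBelow, hw']
        rw [this]
        have hc' : (b.insert w r).contains v = true := by
          rw [PySem.Dict.contains_insert, hc]; simp
        obtain ⟨ha1, ha2⟩ := ih (b.insert w r) (r + 1) hc'
        refine ⟨ha1, ?_⟩
        rw [ha2, PySem.Dict.getD_insert, if_neg hvw]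

theorem bBelow_spec (l : List Int) (b : PySem.Dict Int Int) (r : Int)
    (hs : l.Pairwise (· ≤ ·)) (v : Int) (hv : v ∈ l) (hb : b.contains v = false) :
    (l.foldl bBelow (b, r)).1.getD v 0 = r + (l.countP (fun w => decide (w < v)) : Int) := by
  induction l generalizing b r with
  | nil => simp at hv
  | cons w t ih =>
      obtain ⟨hw1, hw2⟩ := List.pairwise_cons.mp hs
      simp only [List.foldl_cons, List.countP_cons]
      by_cases hwv : w = v
      · subst hwv
        have hstep : bBelow (b, r) w = (b.insert w r, r + 1) := by simp [bBelow, hb]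
        rw [hstep]
        have hcnt : t.countP (fun x => decide (x < w)) = 0 := by
          rw [List.countP_eq_zero]
          intro x hx
          have := hw1 x hx
          simp; omega
        have hpres := bBelow_pres t (b.insert w r) (r + 1) w
          (by rw [PySem.Dict.contains_insert]; simp)
        rw [hpres.2, PySem.Dict.getD_insert_self, hcnt]
        simp
      · have hvt : v ∈ t := by rcases List.mem_cons.mp hv with h | h; exact absurd h.symm hwv; exact h
        have hwlt : w < v := lt_of_le_of_ne (hw1 v hvt) hwv
        have he : (decide (w < v) : Bool) = true := by simpa using hwlt
        by_cases hcw : b.contains w = true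
        · have hstep : bBelow (b, r) w = (b, r + 1) := by simp [bBelow, hcw]
          rw [hstep, ih b (r + 1) hw2 hvt hb, he]
          norm_num
          ring
        · have hcw' : b.contains w = false := by simpa using hcw
          have hstep : bBelow (b, r) w = (b.insert w r, r + 1) := by
            simp [bBelow, hcw']
          rw [hstep]
          have hb' : (b.insert w r).contains v = false := by
            rw [PySem.Dict.contains_insert, hb]
            simpa using fun h => absurd h.symm hwv
          rw [ih (b.insert w r) (r + 1) hw2 hvt hb', he]
          norm_num
          ring

-- ---- B-side: per-item delta of the correction loop ----

def deltaFix (cnt : PySem.Dict (Int × Int) Int) (net : List Int) (k : Int)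
    (x : (Int × Int) × Int) : Int :=
  if cnt.getD (x.1.2, x.1.1) 0 < x.2 then
    (if k = x.1.1 then 1 else 0) -
    (if PySem.List.pyGetD net x.1.1 0 > PySem.List.pyGetD net x.1.2 0 then
        (if k = x.1.1 then 1 else 0)
     else if PySem.List.pyGetD net x.1.2 0 > PySem.List.pyGetD net x.1.1 0 then
        (if k = x.1.2 then 1 else 0)
     else 0)
  else 0

theorem bFix_fold (cnt : PySem.Dict (Int × Int) Int) (net : List Int) (nn : Nat)
    (L : List ((Int × Int) × Int)) :
    ∀ (sc : List Int), sc.length = nn →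
    (∀ x ∈ L, cnt.getD (x.1.2, x.1.1) 0 < x.2 → InR nn x.1) →
    (L.foldl (bFix cnt net) sc).length = nn ∧
    ∀ k : Nat, k < nn → (L.foldl (bFix cnt net) sc).getD k 0 =
      sc.getD k 0 + (L.map (deltaFix cnt net (k : Int))).sum := by
  induction L with
  | nil => intro sc hlen _; exact ⟨hlen, fun k _ => by simp⟩
  | cons x t ih =>
      intro sc hlen hL
      simp only [List.foldl_cons, List.map_cons, List.sum_cons]
      set i := x.1.1 with hi
      set j := x.1.2 with hj
      by_cases hact : cnt.getD (j, i) 0 < x.2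
      · obtain ⟨hi0, hi1, hj0, hj1⟩ := hL x (List.mem_cons_self ..) hact
        have hstep : ∃ sc' : List Int, bFix cnt net sc x = sc' ∧ sc'.length = nn ∧
            ∀ k : Nat, k < nn → sc'.getD k 0 = sc.getD k 0 + deltaFix cnt net (k : Int) x := by
          have hgact : (x.2 > cnt.getD (j, i) 0) = True := by simp [hact]
          by_cases hb1 : PySem.List.pyGetD net i 0 > PySem.List.pyGetD net j 0
          · refine ⟨sc, ?_, hlen, ?_⟩
            · show (if x.2 > cnt.getD (j, i) 0 then _ else sc) = sc
              rw [if_pos hact, if_pos hb1,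
                  pyGetD_pySetD_int _ _ _ _ _ hi0 hi0 (by omega),
                  if_pos rfl, pySetD_pySetD_same _ _ _ _ hi0]
              have : PySem.List.pyGetD sc i 0 - 1 + 1 = PySem.List.pyGetD sc i 0 := by ring
              rw [this, set_self_int _ _ hi0 (by omega)]
            · intro k hk
              simp only [deltaFix, if_pos hact, if_pos hb1, ← hi, ← hj]
              split_ifs <;> ring
          · by_cases hb2 : PySem.List.pyGetD net j 0 > PySem.List.pyGetD net i 0
            · have hij : i ≠ j := by
                intro h; rw [h] at hb2; omega
              refine ⟨PySem.List.pySetD (PySem.List.pySetD sc j (PySem.List.pyGetD sc j 0 - 1)) i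
                  (PySem.List.pyGetD sc i 0 + 1), ?_, ?_, ?_⟩
              · show (if x.2 > cnt.getD (j, i) 0 then _ else sc) = _
                rw [if_pos hact, if_neg hb1, if_pos hb2,
                    pyGetD_pySetD_int _ _ _ _ _ hj0 hi0 (by omega), if_neg hij]
              · rw [length_pySetD_nonneg _ _ _ hi0, length_pySetD_nonneg _ _ _ hj0, hlen]
              · intro k hk
                have hck : sc.getD k 0 = PySem.List.pyGetD sc (k : Int) 0 :=
                  (PySem.List.pyGetD_natCast _ _ _).symm
                have hck2 : (PySem.List.pySetD (PySem.List.pySetD sc j (PySem.List.pyGetD sc j 0 - 1)) i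
                    (PySem.List.pyGetD sc i 0 + 1)).getD k 0 =
                    PySem.List.pyGetD (PySem.List.pySetD (PySem.List.pySetD sc j
                      (PySem.List.pyGetD sc j 0 - 1)) i (PySem.List.pyGetD sc i 0 + 1)) (k : Int) 0 :=
                  (PySem.List.pyGetD_natCast _ _ _).symm
                rw [hck2, pyGetD_pySetD_int _ _ _ _ _ hi0 (by omega)
                    (by rw [length_pySetD_nonneg _ _ _ hj0]; omega),
                  pyGetD_pySetD_int _ _ _ _ _ hj0 (by omega) (by omega)]
                simp only [deltaFix, if_pos hact, if_neg hb1, if_pos hb2, ← hi, ← hj]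
                rw [hck]
                split_ifs <;> simp_all <;> ring
            · refine ⟨PySem.List.pySetD sc i (PySem.List.pyGetD sc i 0 + 1), ?_, ?_, ?_⟩
              · show (if x.2 > cnt.getD (j, i) 0 then _ else sc) = _
                rw [if_pos hact, if_neg hb1, if_neg hb2]
              · rw [length_pySetD_nonneg _ _ _ hi0, hlen]
              · intro k hk
                have hck : sc.getD k 0 = PySem.List.pyGetD sc (k : Int) 0 :=
                  (PySem.List.pyGetD_natCast _ _ _).symm
                have hck2 : (PySem.List.pySetD sc i (PySem.List.pyGetD sc i 0 + 1)).getD k 0 =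
                    PySem.List.pyGetD (PySem.List.pySetD sc i (PySem.List.pyGetD sc i 0 + 1)) (k : Int) 0 :=
                  (PySem.List.pyGetD_natCast _ _ _).symm
                rw [hck2, pyGetD_pySetD_int _ _ _ _ _ hi0 (by omega) (by omega)]
                simp only [deltaFix, if_pos hact, if_neg hb1, if_neg hb2, ← hi, ← hj]
                rw [hck]
                split_ifs <;> simp_all
        obtain ⟨sc', he, hlen', hval⟩ := hstep
        rw [he]
        obtain ⟨hl2, he2⟩ := ih sc' hlen' (fun y hy => hL y (List.mem_cons_of_mem _ hy))
        refine ⟨hl2, ?_⟩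
        intro k hk
        rw [he2 k hk, hval k hk]
        ring
      · have he : bFix cnt net sc x = sc := by
          show (if x.2 > cnt.getD (j, i) 0 then _ else sc) = sc
          rw [if_neg hact]
        rw [he]
        obtain ⟨hl2, he2⟩ := ih sc hlen (fun y hy => hL y (List.mem_cons_of_mem _ hy))
        refine ⟨hl2, ?_⟩
        intro k hk
        rw [he2 k hk]
        have : deltaFix cnt net (k : Int) x = 0 := by
          simp [deltaFix, hact, ← hi, ← hj]
        rw [this]
        ring

-- ---- generic sum bookkeeping ----

theorem sum_map_single {α : Type} [DecidableEq α] (l : List α) (f : α → Int) (k : α)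
    (hk : k ∈ l) (hn : l.Nodup) (hz : ∀ x ∈ l, x ≠ k → f x = 0) :
    (l.map f).sum = f k := by
  induction l with
  | nil => simp at hk
  | cons x t ih =>
      simp only [List.map_cons, List.sum_cons]
      rcases List.mem_cons.mp hk with hx | hx
      · subst hx
        have hts : (t.map f).sum = 0 := by
          apply List.sum_eq_zero
          intro y hy
          obtain ⟨z, hz', rfl⟩ := List.mem_map.mp hy
          have hzk : z ≠ k := fun h => (List.nodup_cons.mp hn).1 (h ▸ hz')
          exact hz z (List.mem_cons_of_mem _ hz') hzk
        rw [hts]; ring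
      · have hxk : x ≠ k := by
          intro h; subst h; exact (List.nodup_cons.mp hn).1 hx
        rw [hz x (List.mem_cons_self ..) hxk,
            ih hx (List.nodup_cons.mp hn).2 (fun y hy => hz y (List.mem_cons_of_mem _ hy))]
        ring

theorem sum_map_subset {α : Type} [DecidableEq α] (l L : List α) (f : α → Int)
    (hl : l.Nodup) (hL : L.Nodup) (hsub : ∀ x ∈ l, x ∈ L)
    (hz : ∀ x ∈ L, x ∉ l → f x = 0) :
    (l.map f).sum = (L.map f).sum := by
  have hperm : (L.filter (fun x => decide (x ∈ l))).Perm l := by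
    rw [List.perm_ext_iff_of_nodup (hL.filter _) hl]
    intro a
    simp only [List.mem_filter, decide_eq_true_eq]
    exact ⟨fun h => h.2, fun h => ⟨hsub a h, h⟩⟩
  have hsplit := (List.filter_append_perm (fun x => decide (x ∈ l)) L).map f |>.sum_eq
  rw [List.map_append, List.sum_append] at hsplit
  have hzero : ((L.filter (fun x => !decide (x ∈ l))).map f).sum = 0 := by
    apply List.sum_eq_zero
    intro y hy
    obtain ⟨z, hz', rfl⟩ := List.mem_map.mp hy
    obtain ⟨hz1, hz2⟩ := List.mem_filter.mp hz'
    exact hz z hz1 (by simpa using hz2)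
  rw [hzero] at hsplit
  rw [← hsplit, add_zero]
  exact ((hperm.map f).sum_eq).symm

theorem sum_flatMap_int {α β : Type} (l : List α) (g : α → List β) (f : β → Int) :
    ((l.flatMap g).map f).sum = (l.map (fun a => ((g a).map f).sum)).sum := by
  induction l with
  | nil => simp
  | cons x t ih => simp [List.flatMap_cons, ih]

-- the full ordered-pair grid over [0, nn)
def pairGrid (nn : Nat) : List (Int × Int) :=
  (PySem.List.pyRange 0 nn 1).flatMap (fun i => (PySem.List.pyRange 0 nn 1).map (fun j => (i, j)))

theorem mem_pairGrid (nn : Nat) (p : Int × Int) : p ∈ pairGrid nn ↔ InR nn p := by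
  unfold pairGrid InR
  simp only [List.mem_flatMap, List.mem_map, PySem.List.mem_pyRange_one]
  constructor
  · rintro ⟨i, ⟨hi1, hi2⟩, j, ⟨hj1, hj2⟩, rfl⟩
    exact ⟨hi1, hi2, hj1, hj2⟩
  · rintro ⟨h1, h2, h3, h4⟩
    exact ⟨p.1, ⟨h1, h2⟩, p.2, ⟨h3, h4⟩, rfl⟩

theorem nodup_pairGrid (nn : Nat) : (pairGrid nn).Nodup := by
  unfold pairGrid
  rw [List.nodup_flatMap]
  constructor
  · intro i _
    apply List.Nodup.map _ (PySem.List.nodup_pyRange_one _ _)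
    intro a b h
    simpa using congrArg Prod.snd h
  · apply List.Pairwise.imp _ (PySem.List.pairwise_lt_pyRange_one (a := 0) (b := (nn : Int)))
    intro a b hab
    intro x hx hy
    obtain ⟨j1, _, rfl⟩ := List.mem_map.mp hx
    obtain ⟨j2, _, he⟩ := List.mem_map.mp hy
    exact absurd (by simpa using congrArg Prod.fst he.symm) (by omega)

-- value of deltaFix at a grid point, fed with the dict's own count
def dP (cnt : PySem.Dict (Int × Int) Int) (net : List Int) (k : Int) (p : Int × Int) : Int :=
  deltaFix cnt net k (p, cnt.getD p 0)

theorem dP_zero (cnt : PySem.Dict (Int × Int) Int) (net : List Int) (k : Int)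
    (p : Int × Int) (h1 : k ≠ p.1) (h2 : k ≠ p.2) : dP cnt net k p = 0 := by
  simp only [dP, deltaFix, if_neg h1, if_neg h2]
  split_ifs <;> ring

theorem pointwise (nn : Nat) (tbl : List (List Int)) (net : List Int)
    (cnt : PySem.Dict (Int × Int) Int)
    (hct : ∀ i j : Int, 0 ≤ i → i < nn → 0 ≤ j → j < nn → cnt.getD (i, j) 0 = tOf tbl i j)
    (k m : Int) (hk0 : 0 ≤ k) (hk1 : k < nn) (hm0 : 0 ≤ m) (hm1 : m < nn) :
    (if (m != k && beatsB (tOf tbl) (gOf net) k m) = true then (1 : Int) else 0)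
    = (if PySem.List.pyGetD net m 0 < PySem.List.pyGetD net k 0 then (1 : Int) else 0)
      + dP cnt net k (k, m) + (if m = k then 0 else dP cnt net k (m, k)) := by
  have e1 : cnt.getD (k, m) 0 = tOf tbl k m := hct k m hk0 hk1 hm0 hm1
  have e2 : cnt.getD (m, k) 0 = tOf tbl m k := hct m k hm0 hm1 hk0 hk1
  by_cases hmk : m = k
  · subst hmk
    simp [dP, deltaFix, e1, beatsB]
  · have hbne : (m != k) = true := by simpa using hmk
    simp only [dP, deltaFix, beatsB, gOf, hbne, Bool.true_and, if_neg hmk, e1, e2,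
      if_neg (fun h => hmk h.symm : ¬ k = m)]
    split_ifs <;> simp_all <;> omega

-- ===== the assembled equivalence =====
-- ===== VERDICT (by name: the statement is the Claim_ definition above) =====
theorem solution_spec : Claim_equal_solution := by
  intro friends gifts _hdom hpre
  obtain ⟨hfne, hg⟩ := hpre
  unfold Spec_solution
  have hA : solution friends gifts =
      (PySem.List.max? ((PySem.List.pyRange 0 (friends.length : Int) 1).foldl
        (fun res i => (PySem.List.pyRange 0 (friends.length : Int) 1).foldl
          (aInner (gifts.foldl (aStep ((PySem.List.enumerate friends 0).foldl
              (fun d p => d.insert p.2 p.1) PySem.Dict.empty))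
            (PySem.List.pyRepeat [0] (friends.length : Int),
             (PySem.List.pyRange 0 (friends.length : Int) 1).map
               (fun _ => PySem.List.pyRepeat [0] (friends.length : Int)))).2
           (gifts.foldl (aStep ((PySem.List.enumerate friends 0).foldl
              (fun d p => d.insert p.2 p.1) PySem.Dict.empty))
            (PySem.List.pyRepeat [0] (friends.length : Int),
             (PySem.List.pyRange 0 (friends.length : Int) 1).map
               (fun _ => PySem.List.pyRepeat [0] (friends.length : Int)))).1 i) res)
        (PySem.List.pyRepeat [0] (friends.length : Int))) (fun x => x)).getD 0 := rfl
  have hB : solution_alt friends gifts =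
      (PySem.List.max?
        ((gifts.foldl (bStep ((PySem.List.enumerate friends 0).foldl
            (fun d p => d.insert p.2 p.1) PySem.Dict.empty))
          (PySem.List.pyRepeat [0] (friends.length : Int), PySem.Dict.empty)).2.items.foldl
          (bFix (gifts.foldl (bStep ((PySem.List.enumerate friends 0).foldl
              (fun d p => d.insert p.2 p.1) PySem.Dict.empty))
            (PySem.List.pyRepeat [0] (friends.length : Int), PySem.Dict.empty)).2
            (gifts.foldl (bStep ((PySem.List.enumerate friends 0).foldl
              (fun d p => d.insert p.2 p.1) PySem.Dict.empty))
            (PySem.List.pyRepeat [0] (friends.length : Int), PySem.Dict.empty)).1)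
          ((gifts.foldl (bStep ((PySem.List.enumerate friends 0).foldl
              (fun d p => d.insert p.2 p.1) PySem.Dict.empty))
            (PySem.List.pyRepeat [0] (friends.length : Int), PySem.Dict.empty)).1.map
            (fun v => (((PySem.List.sorted (gifts.foldl (bStep ((PySem.List.enumerate friends 0).foldl
                (fun d p => d.insert p.2 p.1) PySem.Dict.empty))
              (PySem.List.pyRepeat [0] (friends.length : Int), PySem.Dict.empty)).1 (fun x => x)
                false).foldl bBelow (PySem.Dict.empty, 0)).1).getD v 0)))
        (fun x => x)).getD 0 := rfl
  rw [hA, hB]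
  set nn := friends.length with hnn
  set FIDX := (PySem.List.enumerate friends 0).foldl (fun d p => d.insert p.2 p.1)
      (PySem.Dict.empty : PySem.Dict String Int) with hFIDX
  set STA := gifts.foldl (aStep FIDX) (PySem.List.pyRepeat [0] (nn : Int),
      (PySem.List.pyRange 0 (nn : Int) 1).map
        (fun _ => PySem.List.pyRepeat [0] (nn : Int))) with hSTA
  set STB := gifts.foldl (bStep FIDX)
      (PySem.List.pyRepeat [0] (nn : Int), (PySem.Dict.empty : PySem.Dict (Int × Int) Int)) with hSTB
  have hrepl : PySem.List.pyRepeat [(0 : Int)] ((nn : Nat) : Int) =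
      List.replicate nn (0 : Int) := by
    rw [PySem.List.pyRepeat_singleton]
    simp
  have hbounds : ∀ g ∈ gifts, (0 ≤ FIDX.getD ((PySem.Str.split₀ g).getD 0 "") 0 ∧
        FIDX.getD ((PySem.Str.split₀ g).getD 0 "") 0 < (nn : Int)) ∧
      (0 ≤ FIDX.getD ((PySem.Str.split₀ g).getD 1 "") 0 ∧
        FIDX.getD ((PySem.Str.split₀ g).getD 1 "") 0 < (nn : Int)) := by
    intro g hgm
    obtain ⟨_, h0, h1⟩ := hg g hgm
    have b0 := fidx_getD_bounds friends _ h0 0 PySem.Dict.empty 0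
    have b1 := fidx_getD_bounds friends _ h1 0 PySem.Dict.empty 0
    rw [← hFIDX] at b0 b1
    exact ⟨⟨b0.1, by omega⟩, ⟨b1.1, by omega⟩⟩
  have hinv0 : GInv nn (PySem.List.pyRepeat [0] (nn : Int))
      ((PySem.List.pyRange 0 (nn : Int) 1).map (fun _ => PySem.List.pyRepeat [0] (nn : Int)))
      (PySem.List.pyRepeat [0] (nn : Int)) PySem.Dict.empty := by
    refine ⟨by rw [hrepl]; simp, by simp [PySem.List.length_pyRange_one], ?_, rfl, ?_, ?_, ?_, ?_⟩
    · intro r hr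
      obtain ⟨x, _, rfl⟩ := List.mem_map.mp hr
      rw [hrepl]; simp
    · intro i j h0 h1 h2 h3
      unfold tOf
      rw [PySem.Dict.getD_empty, PySem.List.pyGetD_map_pyRange_of_nonneg _ _ _ _ h0 h1, hrepl]
      rw [PySem.List.pyGetD_eq_getElem _ _ h2 (by simpa using h3), List.getElem_replicate]
    · exact PySem.Dict.nodup_keys_empty
    · intro p hp
      rw [PySem.Dict.contains_empty] at hp
      exact absurd hp (by simp)
    · intro p _
      exact PySem.Dict.getD_empty _ _
  have hinv := gfold_pres nn FIDX gifts hbounds _ _ _ _ hinv0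
  rw [← hSTA, ← hSTB] at hinv
  obtain ⟨hok1, hok2, hok3, hnet, hct, hnodup, hc3, hc4⟩ := hinv
  -- A-side characterisation
  obtain ⟨hAl, hAe⟩ := aOuter_fold STA.2 STA.1 nn nn 0
      (PySem.List.pyRepeat [0] (nn : Int)) (by omega) (le_refl 0) (by rw [hrepl]; simp)
      (fun k hk => by
        rw [hrepl, List.getD_eq_getElem _ _ (by simpa using hk), List.getElem_replicate,
            if_neg (show ¬ ((k : Int) < 0) by omega)])
  -- B-side: initial scores from the sorted-rank dict
  have hNlen : STB.1.length = nn := by rw [hnet, hok1]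
  have hgetnn : ∀ q : Nat, q < nn → STB.1.getD q 0 = PySem.List.pyGetD STB.1 (q : Int) 0 := by
    intro q hq
    rw [PySem.List.pyGetD_natCast]
  have hs0 : ∀ k : Nat, k < nn →
      (STB.1.map (fun v => (((PySem.List.sorted STB.1 (fun x => x) false).foldl bBelow
          (PySem.Dict.empty, 0)).1).getD v 0)).getD k 0 =
      ((STB.1.countP (fun w => decide (w < PySem.List.pyGetD STB.1 (k : Int) 0))) : Int) := by
    intro k hk
    have hklen : k < STB.1.length := by omega
    rw [List.getD_eq_getElem _ _ (by simpa using hklen), List.getElem_map]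
    have hmem : STB.1[k] ∈ PySem.List.sorted STB.1 (fun x => x) false := by
      rw [PySem.List.mem_sorted]
      exact List.getElem_mem hklen
    have hpw : (PySem.List.sorted STB.1 (fun x => x) false).Pairwise (· ≤ ·) := by
      simpa using PySem.List.sorted_pairwise STB.1 (fun x => x)
    rw [bBelow_spec _ _ _ hpw _ hmem (PySem.Dict.contains_empty _),
        (PySem.List.sorted_perm STB.1 (fun x => x) false).countP_eq,
        PySem.List.pyGetD_eq_getElem _ _ (by omega) (by simpa using hklen)]
    simp
    rfl
  have hs0len : (STB.1.map (fun v => (((PySem.List.sorted STB.1 (fun x => x) false).foldl bBelow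
      (PySem.Dict.empty, 0)).1).getD v 0)).length = nn := by
    rw [List.length_map, hNlen]
  -- B-side: the correction fold
  obtain ⟨hFl, hFe⟩ := bFix_fold STB.2 STB.1 nn STB.2.items _ hs0len
      (fun x hx _ => by
        have hx' : (x.1, x.2) ∈ STB.2.items := by simpa using hx
        have hk : x.1 ∈ STB.2.keys := PySem.Dict.mem_keys_of_mem_items _ hx'
        have hcon : STB.2.contains x.1 = true := (PySem.Dict.contains_iff_mem_keys _ _).mpr hk
        exact (hc3 x.1 hcon).1)
  -- turn the per-item deltas into grid deltas
  have hmapd : ∀ k : Int, STB.2.items.map (deltaFix STB.2 STB.1 k) =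
      STB.2.keys.map (dP STB.2 STB.1 k) := by
    intro k
    show STB.2.items.map (deltaFix STB.2 STB.1 k) =
      (STB.2.items.map (fun x => x.1)).map (dP STB.2 STB.1 k)
    rw [List.map_map]
    apply List.map_congr_left
    intro x hx
    have hx' : (x.1, x.2) ∈ STB.2.items := by simpa using hx
    have hval : STB.2.getD x.1 0 = x.2 := PySem.Dict.getD_of_mem_items _ hx' hnodup 0
    show deltaFix STB.2 STB.1 k x = deltaFix STB.2 STB.1 k (x.1, STB.2.getD x.1 0)
    rw [hval]
  have hgrid : ∀ k : Int, (STB.2.keys.map (dP STB.2 STB.1 k)).sum =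
      ((pairGrid nn).map (dP STB.2 STB.1 k)).sum := by
    intro k
    apply sum_map_subset _ _ _ hnodup (nodup_pairGrid nn)
    · intro p hp
      rw [mem_pairGrid]
      exact (hc3 p ((PySem.Dict.contains_iff_mem_keys _ _).mpr hp)).1
    · intro p _ hpk
      have hcon : STB.2.contains p = false := by
        rw [PySem.Dict.contains_eq_decide_mem_keys]
        simpa using hpk
      have hz : STB.2.getD p 0 = 0 := hc4 p hcon
      have hz2 : 0 ≤ STB.2.getD (p.2, p.1) 0 := by
        by_cases hcc : STB.2.contains (p.2, p.1) = true
        · linarith [(hc3 _ hcc).2]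
        · rw [hc4 _ (by simpa using hcc)]
      simp only [dP, deltaFix, hz]
      rw [if_neg (by omega)]
  -- decompose the grid sum into the k-th row and the k-th column
  have hrange_mem : ∀ k : Nat, k < nn → ((k : Int) ∈ PySem.List.pyRange 0 (nn : Int) 1) := by
    intro k hk
    rw [PySem.List.mem_pyRange_one]
    omega
  have hgridsum : ∀ k : Nat, k < nn →
      ((pairGrid nn).map (dP STB.2 STB.1 (k : Int))).sum =
      ((PySem.List.pyRange 0 (nn : Int) 1).map
        (fun j => dP STB.2 STB.1 (k : Int) ((k : Int), j))).sum +
      ((PySem.List.pyRange 0 (nn : Int) 1).map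
        (fun i => if i = (k : Int) then 0 else dP STB.2 STB.1 (k : Int) (i, (k : Int)))).sum := by
    intro k hk
    unfold pairGrid
    rw [sum_flatMap_int]
    have hmapeq : (PySem.List.pyRange 0 (nn : Int) 1).map
        (fun i => (((PySem.List.pyRange 0 (nn : Int) 1).map (fun j => (i, j))).map
          (dP STB.2 STB.1 (k : Int))).sum)
      = (PySem.List.pyRange 0 (nn : Int) 1).map
        (fun i => (if i = (k : Int) then
            ((PySem.List.pyRange 0 (nn : Int) 1).map
              (fun j => dP STB.2 STB.1 (k : Int) ((k : Int), j))).sum else 0)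
          + (if i = (k : Int) then 0 else dP STB.2 STB.1 (k : Int) (i, (k : Int)))) := by
      apply List.map_congr_left
      intro i hi
      rw [List.map_map]
      by_cases hik : i = (k : Int)
      · subst hik
        rw [if_pos rfl, if_pos rfl, add_zero]
        rfl
      · rw [if_neg hik, if_neg hik, zero_add]
        apply sum_map_single _ _ ((k : Int)) (hrange_mem k hk) (PySem.List.nodup_pyRange_one _ _)
        intro j _ hjk
        exact dP_zero _ _ _ (i, j) (fun h => hik h.symm) (fun h => hjk h.symm)
    rw [hmapeq, PySem.List.sum_map_add_int]
    congr 1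
    have hsingle := sum_map_single (PySem.List.pyRange 0 (nn : Int) 1)
      (fun i => if i = (k : Int) then
        ((PySem.List.pyRange 0 (nn : Int) 1).map
          (fun j => dP STB.2 STB.1 (k : Int) ((k : Int), j))).sum else 0)
      ((k : Int)) (hrange_mem k hk) (PySem.List.nodup_pyRange_one _ _)
      (fun i _ hik => if_neg hik)
    rw [hsingle]
    simp
  -- per-index equality of the two score lists
  have hperk : ∀ k : Nat, k < nn →
      (STB.2.items.foldl (bFix STB.2 STB.1)
        (STB.1.map (fun v => (((PySem.List.sorted STB.1 (fun x => x) false).foldl bBelow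
          (PySem.Dict.empty, 0)).1).getD v 0))).getD k 0 =
      score (tOf STA.2) (gOf STA.1) nn (k : Int) := by
    intro k hk
    rw [hFe k hk, hs0 k hk, hmapd, hgrid, hgridsum k hk, ← hnet]
    unfold score
    have hbase : ((STB.1.countP (fun w => decide (w < PySem.List.pyGetD STB.1 (k : Int) 0))) : Int)
        = (((PySem.List.pyRange 0 (nn : Int) 1).countP
            (fun m => decide (PySem.List.pyGetD STB.1 m 0 < PySem.List.pyGetD STB.1 (k : Int) 0))) : Int) := by
      have hxs := PySem.List.map_pyGetD_pyRange_zero' STB.1 0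
      set c := PySem.List.pyGetD STB.1 (k : Int) 0 with hc
      conv_lhs => rw [← hxs]
      rw [List.countP_map, hNlen]
      rfl
    rw [hbase,
      ← PySem.List.sum_map_ite_one_zero
        (fun m => decide (PySem.List.pyGetD STB.1 m 0 < PySem.List.pyGetD STB.1 (k : Int) 0))
        (PySem.List.pyRange 0 (nn : Int) 1),
      ← PySem.List.sum_map_ite_one_zero
        (fun m => m != (k : Int) && beatsB (tOf STA.2) (gOf STB.1) (k : Int) m)
        (PySem.List.pyRange 0 (nn : Int) 1),
      ← PySem.List.sum_map_add_int (PySem.List.pyRange 0 (nn : Int) 1)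
        (fun j => dP STB.2 STB.1 (k : Int) ((k : Int), j))
        (fun i => if i = (k : Int) then 0 else dP STB.2 STB.1 (k : Int) (i, (k : Int))),
      ← PySem.List.sum_map_add_int (PySem.List.pyRange 0 (nn : Int) 1)
        (fun m => if (decide (PySem.List.pyGetD STB.1 m 0 < PySem.List.pyGetD STB.1 (k : Int) 0)) = true
            then (1 : Int) else 0)
        (fun m => dP STB.2 STB.1 (k : Int) ((k : Int), m)
          + (if m = (k : Int) then 0 else dP STB.2 STB.1 (k : Int) (m, (k : Int))))]
    refine congrArg List.sum (List.map_congr_left ?_)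
    intro m hm
    rw [PySem.List.mem_pyRange_one] at hm
    have hp := pointwise nn STA.2 STB.1 STB.2 hct (k : Int) m
      (by omega) (by exact_mod_cast hk) hm.1 hm.2
    rw [hp]
    simp only [decide_eq_true_eq]
    ring
  -- the two result lists are equal
  have hfinal : List.foldl (fun res i => List.foldl (aInner STA.2 STA.1 i) res
        (PySem.List.pyRange 0 (nn : Int) 1)) (PySem.List.pyRepeat [0] (nn : Int))
        (PySem.List.pyRange 0 (nn : Int) 1)
      = List.foldl (bFix STB.2 STB.1)
        (STB.1.map (fun v => (((PySem.List.sorted STB.1 (fun x => x) false).foldl bBelow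
          (PySem.Dict.empty, 0)).1).getD v 0)) STB.2.items := by
    apply List.ext_getElem (by rw [hAl, hFl])
    intro q h1 h2
    have hq : q < nn := by rw [hAl] at h1; exact h1
    have e1 := hAe q hq
    have e2 := hperk q hq
    rw [List.getD_eq_getElem _ _ h1] at e1
    rw [List.getD_eq_getElem _ _ h2] at e2
    rw [e1, e2, if_pos (show (q : Int) < max 0 (nn : Int) by omega)]
  rw [hfinal]
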